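-- pv_equiv track=rewrite | github.com/konj5/Visje-racunske-metode | Naloga3/split_step.py | startstuff
-- ===== SOURCE A (Python) =====
-- def startstuff(n):
--     ret = []
--     for i in range(n):
--         if i % 2 == 0:
--             ret.append(f"1_a{i//2+1}_[A]")
--         if i % 2 == 1:
--             ret.append(f"1_b{i//2+1}_[B]")
--     return ret
-- ===== SOURCE B (Python) =====
-- def startstuff(n):
--     a = ["1_a%d_[A]" % k for k in range(1, (n + 1) // 2 + 1)]
--     b = ["1_b%d_[B]" % k for k in range(1, n // 2 + 1)]
--     out = []
--     for x, y in zip(a, b):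
--         out += [x, y]
--     out += a[len(b):]
--     return out
-- ===== Notes on version B (the rewrite author's own statement) =====
-- stated objective: alternative
-- what changed: B builds the a-label and b-label families as two separate comprehensions and interleaves them (zip plus the leftover tail) instead of A's single loop that parity-tests each index.
import Mathlib
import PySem

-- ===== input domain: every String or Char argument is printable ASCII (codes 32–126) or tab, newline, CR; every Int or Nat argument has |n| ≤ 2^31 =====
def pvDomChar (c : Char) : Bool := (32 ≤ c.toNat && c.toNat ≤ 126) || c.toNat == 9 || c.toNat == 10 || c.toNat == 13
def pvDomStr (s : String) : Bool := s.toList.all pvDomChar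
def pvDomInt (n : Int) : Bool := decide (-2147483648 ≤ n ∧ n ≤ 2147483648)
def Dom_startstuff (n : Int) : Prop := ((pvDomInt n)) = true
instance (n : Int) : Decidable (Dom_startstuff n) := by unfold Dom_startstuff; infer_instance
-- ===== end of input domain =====

-- B builds the two label families separately and interleaves them (zip then tail), instead of A's single parity-tested loop; objective: alternative decomposition, same cost.

-- ===== PORT A =====
def startstuff (n : Int) : List String :=
  (PySem.List.pyRange 0 n 1).foldl (fun ret i =>
    let ret := if PySem.Int.mod i 2 = 0
      then ret ++ ["1_a" ++ PySem.Int.toStr (PySem.Int.floordiv i 2 + 1) ++ "_[A]"]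
      else ret
    if PySem.Int.mod i 2 = 1
      then ret ++ ["1_b" ++ PySem.Int.toStr (PySem.Int.floordiv i 2 + 1) ++ "_[B]"]
      else ret) []

-- ===== PORT B =====
def startstuff_alt (n : Int) : List String :=
  let a := (PySem.List.pyRange 1 (PySem.Int.floordiv (n + 1) 2 + 1) 1).map
    (fun k => "1_a" ++ PySem.Int.toStr k ++ "_[A]")
  let b := (PySem.List.pyRange 1 (PySem.Int.floordiv n 2 + 1) 1).map
    (fun k => "1_b" ++ PySem.Int.toStr k ++ "_[B]")
  ((a.zip b).foldl (fun out p => out ++ [p.1, p.2]) []) ++ a.drop b.length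

-- ===== PRECONDITION & SPEC =====
def Spec_startstuff (n : Int) (out : List String) : Prop := out = startstuff_alt n
instance (n : Int) (out : List String) : Decidable (Spec_startstuff n out) := by unfold Spec_startstuff; infer_instance

-- ===== CLAIM (what is proved, stated in full; the proofs are below) =====
def Claim_equal_startstuff : Prop := ∀ (n : Int), Dom_startstuff n → Spec_startstuff n (startstuff n)


-- ===== LEMMAS AND PROOFS =====

def fA (k : Int) : String := "1_a" ++ PySem.Int.toStr k ++ "_[A]"
def fB (k : Int) : String := "1_b" ++ PySem.Int.toStr k ++ "_[B]"

def aList (t : Nat) : List String :=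
  (PySem.List.pyRange 1 ((t : Int) + 1) 1).map (fun k => "1_a" ++ PySem.Int.toStr k ++ "_[A]")
def bList (t : Nat) : List String :=
  (PySem.List.pyRange 1 ((t : Int) + 1) 1).map (fun k => "1_b" ++ PySem.Int.toStr k ++ "_[B]")

def itl (a b : List String) : List String :=
  ((a.zip b).foldl (fun out p => out ++ [p.1, p.2]) []) ++ a.drop b.length

lemma aList_len (t : Nat) : (aList t).length = t := by
  simp [aList, PySem.List.length_pyRange_one]

lemma bList_len (t : Nat) : (bList t).length = t := by
  simp [bList, PySem.List.length_pyRange_one]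

lemma aList_snoc (t : Nat) : aList (t + 1) = aList t ++ [fA ((t : Int) + 1)] := by
  unfold aList fA
  rw [show ((t + 1 : Nat) : Int) + 1 = ((t : Int) + 1) + 1 by push_cast; ring,
    PySem.List.pyRange_one_succ_right (by omega)]
  simp

lemma bList_snoc (t : Nat) : bList (t + 1) = bList t ++ [fB ((t : Int) + 1)] := by
  unfold bList fB
  rw [show ((t + 1 : Nat) : Int) + 1 = ((t : Int) + 1) + 1 by push_cast; ring,
    PySem.List.pyRange_one_succ_right (by omega)]
  simp

lemma zip_snoc_left (a b : List String) (x : String) (h : b.length ≤ a.length) :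
    (a ++ [x]).zip b = a.zip b := by
  induction a generalizing b with
  | nil => cases b <;> simp_all
  | cons y a ih =>
    cases b with
    | nil => simp
    | cons z b => simp only [List.cons_append, List.zip_cons_cons, List.cons.injEq,
        true_and]; exact ih b (by simpa using h)

lemma itl_snoc_a (a b : List String) (x : String) (h : b.length ≤ a.length) :
    itl (a ++ [x]) b = itl a b ++ [x] := by
  unfold itl
  rw [zip_snoc_left a b x h, List.drop_append_of_le_length h, List.append_assoc]

lemma itl_snoc_ab (a b : List String) (x y : String) (h : a.length = b.length) :
    itl (a ++ [x]) (b ++ [y]) = itl (a ++ [x]) b ++ [y] := by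
  unfold itl
  rw [List.zip_append h, zip_snoc_left a b x (le_of_eq h.symm)]
  simp [List.foldl_append, h]

lemma alt_nonneg (m : Nat) : startstuff_alt (m : Int) = itl (aList ((m + 1) / 2)) (bList (m / 2)) := by
  unfold startstuff_alt itl aList bList
  rw [show PySem.Int.floordiv ((m : Int) + 1) 2 + 1 = (((m + 1) / 2 : Nat) : Int) + 1 by
      rw [PySem.Int.floordiv_eq_ediv_of_pos (by norm_num)]; omega,
    show PySem.Int.floordiv (m : Int) 2 + 1 = (((m / 2 : Nat)) : Int) + 1 by
      rw [PySem.Int.floordiv_eq_ediv_of_pos (by norm_num)]; omega]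

lemma a_step (m : Nat) : startstuff (((m + 1 : Nat)) : Int) =
    startstuff (m : Int) ++
      [if m % 2 = 0 then fA ((m / 2 : Nat) + 1) else fB ((m / 2 : Nat) + 1)] := by
  unfold startstuff
  rw [show ((m + 1 : Nat) : Int) = (m : Int) + 1 by push_cast; ring,
    PySem.List.pyRange_one_succ_right (by omega : (0 : Int) ≤ (m : Int)), List.foldl_append]
  simp only [List.foldl_cons, List.foldl_nil]
  rw [show PySem.Int.mod (m : Int) 2 = (m : Int) % 2 from PySem.Int.mod_eq_emod_of_pos (by norm_num),
    show PySem.Int.floordiv (m : Int) 2 = ((m / 2 : Nat) : Int) by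
      rw [PySem.Int.floordiv_eq_ediv_of_pos (by norm_num)]; omega]
  rcases Nat.even_or_odd m with h | h
  · obtain ⟨t, ht⟩ := h
    have h0 : (m : Int) % 2 = 0 := by omega
    have h2 : m % 2 = 0 := by omega
    simp [h0, h2, fA]
  · obtain ⟨t, ht⟩ := h
    have h1 : (m : Int) % 2 = 1 := by omega
    have h2 : m % 2 = 1 := by omega
    simp [h1, h2, fB]

lemma eq_nonneg (m : Nat) : startstuff (m : Int) = startstuff_alt (m : Int) := by
  induction m with
  | zero => decide
  | succ m ih =>
    rw [a_step, ih, alt_nonneg, alt_nonneg]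
    rcases Nat.even_or_odd m with h | h
    · obtain ⟨t, ht⟩ := h
      have h2 : m % 2 = 0 := by omega
      have e1 : (m + 1 + 1) / 2 = m / 2 + 1 := by omega
      have e2 : (m + 1) / 2 = m / 2 := by omega
      rw [e1, e2, aList_snoc, itl_snoc_a _ _ _ (by rw [aList_len, bList_len]),
        if_pos h2]
    · obtain ⟨t, ht⟩ := h
      have h2 : m % 2 = 1 := by omega
      have e1 : (m + 1 + 1) / 2 = m / 2 + 1 := by omega
      have e2 : (m + 1) / 2 = m / 2 + 1 := by omega
      rw [e1, e2, aList_snoc, bList_snoc,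
        itl_snoc_ab _ _ _ _ (by rw [aList_len, bList_len]), if_neg (by omega)]

lemma eq_neg (n : Int) (h : n < 0) : startstuff n = startstuff_alt n := by
  unfold startstuff startstuff_alt
  rw [PySem.List.pyRange_one_eq_nil (by omega),
    PySem.List.pyRange_one_eq_nil (by
      rw [PySem.Int.floordiv_eq_ediv_of_pos (by norm_num)]; omega),
    PySem.List.pyRange_one_eq_nil (by
      rw [PySem.Int.floordiv_eq_ediv_of_pos (by norm_num)]; omega)]
  simp

-- ===== VERDICT (by name: the statement is the Claim_ definition above) =====
theorem startstuff_spec : Claim_equal_startstuff := by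
  intro n _
  unfold Spec_startstuff
  rcases le_or_gt 0 n with h | h
  · have : n = ((n.toNat : Nat) : Int) := by omega
    rw [this]; exact eq_nonneg n.toNat
  · exact eq_neg n h
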